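-- pv_equiv track=rewrite | github.com/anonymous-submission-1234134124/benchmark_set | prog_repair_bench/processors/code_block_processing.py | strip_decorators
-- ===== SOURCE A (Python) =====
-- def strip_decorators(code: str) -> str:
--     """
--     Remove leading decorators that directly precede a function definition.
--     Keeps the rest of the code unchanged.
--     """
--     if not code:
--         return code
--
--     lines = code.splitlines()
--     lines = [line for line in lines if line.strip()]
--     lines_without_decorator = []
--     is_method_body = False
--     for line in lines:
--         if line.strip().startswith("@") and not is_method_body:
--             continue
--         else:
--             is_method_body = True
--         lines_without_decorator.append(line)
--     return "\n".join(lines_without_decorator)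
-- ===== SOURCE B (Python) =====
-- def strip_decorators(code: str) -> str:
--     """
--     Remove leading decorators that directly precede a function definition.
--     Keeps the rest of the code unchanged.
--     """
--     if not code:
--         return code
--     text = "\n".join(line for line in code.splitlines() if line.strip())
--     while text:
--         head, _, rest = text.partition("\n")
--         if not head.strip().startswith("@"):
--             break
--         text = rest
--     return text
-- ===== Notes on version B (the rewrite author's own statement) =====
-- stated objective: alternative
-- what changed: B joins the non-blank lines into a single string first and then peels decorator lines off the front of that joined string one at a time with str.partition, instead of A's single list pass that accumulates kept lines under a boolean flag and joins at the end.
import Mathlib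
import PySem

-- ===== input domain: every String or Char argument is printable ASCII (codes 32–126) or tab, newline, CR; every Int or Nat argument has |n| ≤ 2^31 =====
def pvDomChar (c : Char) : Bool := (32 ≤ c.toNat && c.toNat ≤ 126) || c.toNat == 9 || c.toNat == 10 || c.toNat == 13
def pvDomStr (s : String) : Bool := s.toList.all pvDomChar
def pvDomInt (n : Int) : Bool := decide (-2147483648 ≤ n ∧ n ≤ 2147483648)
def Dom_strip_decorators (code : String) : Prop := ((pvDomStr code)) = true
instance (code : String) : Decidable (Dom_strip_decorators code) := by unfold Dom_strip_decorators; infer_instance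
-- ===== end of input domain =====

-- B works on the joined string instead of the line list: it joins the non-blank lines once and
-- then peels decorator lines off the front of that single string with partition; same cost class.

-- ===== PORT A =====
-- the body of A's for-loop (state = (lines_without_decorator, is_method_body))
def stripDecStep (st : List String × Bool) (line : String) : List String × Bool :=
  if PySem.Str.startswith (PySem.Str.strip line) "@" && !st.2 then st
  else (st.1 ++ [line], true)

def strip_decorators (code : String) : String :=
  if code == "" then code
  else
    let lines := (PySem.Str.splitlines code).filter (fun l => !(PySem.Str.strip l == ""))
    let st := lines.foldl stripDecStep ([], false)
    PySem.Str.join "\n" st.1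

-- ===== PORT B =====
-- text.partition("\n") ported by hand over List Char (PySem has no partition): returns
-- (head, rest); exact for the one-char separator — splits at the FIRST '\n', and gives
-- (text, "") when no '\n' occurs, just as Python's partition (the middle component is
-- unused by B and omitted).
def partNl : List Char → List Char × List Char
  | [] => ([], [])
  | c :: cs => if c = '\n' then ([], cs) else (c :: (partNl cs).1, (partNl cs).2)

-- termination of B's while loop: each iteration drops at least one character
theorem partNl_snd_length_lt : ∀ (t : List Char), t ≠ [] → (partNl t).2.length < t.length := by
  intro t ht
  induction t with
  | nil => exact absurd rfl ht
  | cons c cs ih =>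
    by_cases hc : c = '\n'
    · simp [partNl, hc]
    · simp only [partNl, hc, if_false]
      by_cases hcs : cs = []
      · subst hcs; simp [partNl]
      · exact Nat.lt_succ_of_lt (ih hcs)

-- B's while loop: peel decorator lines off the front of the joined text
def stripLoopB (text : List Char) : List Char :=
  if h : text = [] then text
  else if PySem.Chars.startswith (PySem.Chars.strip (partNl text).1) ['@'] then
    stripLoopB (partNl text).2
  else text
termination_by text.length
decreasing_by exact partNl_snd_length_lt text h

def strip_decorators_alt (code : String) : String :=
  if code == "" then code
  else
    let text := PySem.Str.join "\n" ((PySem.Str.splitlines code).filter (fun l => !(PySem.Str.strip l == "")))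
    String.ofList (stripLoopB text.toList)

-- ===== PRECONDITION & SPEC =====
def Spec_strip_decorators (code : String) (out : String) : Prop := out = strip_decorators_alt code
instance (code : String) (out : String) : Decidable (Spec_strip_decorators code out) := by unfold Spec_strip_decorators; infer_instance

-- ===== CLAIM (what is proved, stated in full; the proofs are below) =====
def Claim_equal_strip_decorators : Prop := ∀ (code : String), Dom_strip_decorators code → Spec_strip_decorators code (strip_decorators code)

-- ===== LEMMAS AND PROOFS =====

-- length of the maximal decorator prefix of the non-blank lines (proof-only helper)
def fndC : List (List Char) → Nat
  | [] => 0
  | l :: ls => if PySem.Chars.startswith (PySem.Chars.strip l) ['@'] then fndC ls + 1 else 0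

theorem stripDecStep_true (acc : List String) (l : String) :
    stripDecStep (acc, true) l = (acc ++ [l], true) := by
  simp [stripDecStep]

theorem stripDecStep_false_dec (acc : List String) (l : String)
    (h : PySem.Chars.startswith (PySem.Chars.strip l.toList) ['@'] = true) :
    stripDecStep (acc, false) l = (acc, false) := by
  simp [stripDecStep, h]

theorem stripDecStep_false_nondec (acc : List String) (l : String)
    (h : ¬ PySem.Chars.startswith (PySem.Chars.strip l.toList) ['@'] = true) :
    stripDecStep (acc, false) l = (acc ++ [l], true) := by
  simp [stripDecStep, h]

-- Once the flag is set, A's loop appends every remaining line.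
theorem foldl_flag_true (lines : List String) (acc : List String) :
    lines.foldl stripDecStep (acc, true) = (acc ++ lines, true) := by
  induction lines generalizing acc with
  | nil => simp
  | cons l ls ih => rw [List.foldl_cons, stripDecStep_true, ih]; simp

-- From a clear flag, A's loop accumulates exactly the lines past the decorator boundary.
theorem foldl_flag_false (lines : List String) (acc : List String) :
    (lines.foldl stripDecStep (acc, false)).1
      = acc ++ lines.drop (fndC (lines.map String.toList)) := by
  induction lines generalizing acc with
  | nil => simp
  | cons l ls ih =>
    by_cases h : PySem.Chars.startswith (PySem.Chars.strip l.toList) ['@'] = true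
    · rw [List.foldl_cons, stripDecStep_false_dec _ _ h, ih]
      simp [fndC, h]
    · rw [List.foldl_cons, stripDecStep_false_nondec _ _ h, foldl_flag_true]
      simp [fndC, h]

-- no line produced by splitlines contains '\n'
theorem go_no_nl (isB : Char → Bool) (hB : isB '\n' = true)
    (s cur : List Char) (acc : List (List Char)) :
    '\n' ∉ cur → (∀ l ∈ acc, '\n' ∉ l) →
    ∀ l ∈ PySem.Chars.splitlines.go isB s cur acc, '\n' ∉ l := by
  fun_induction PySem.Chars.splitlines.go isB s cur acc <;> intro hcur hacc
  case case1 =>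
    intro l hl; exact hacc l (List.mem_reverse.mp hl)
  case case2 =>
    intro l hl
    rcases List.mem_cons.mp (List.mem_reverse.mp hl) with h | h
    · exact fun hc => hcur (List.mem_reverse.mp (h ▸ hc))
    · exact hacc l h
  case case3 ih =>
    refine ih (by simp) ?_
    intro l hl
    rcases List.mem_cons.mp hl with h | h
    · exact fun hc => hcur (List.mem_reverse.mp (h ▸ hc))
    · exact hacc l h
  case case4 ih =>
    refine ih (by simp) ?_
    intro l hl
    rcases List.mem_cons.mp hl with h | h
    · exact fun hc => hcur (List.mem_reverse.mp (h ▸ hc))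
    · exact hacc l h
  case case5 hno hisB ih =>
    refine ih ?_ hacc
    intro hc
    rcases List.mem_cons.mp hc with h | h
    · exact hisB (h ▸ hB)
    · exact hcur h

theorem splitlines_no_nl (s : List Char) :
    ∀ l ∈ PySem.Chars.splitlines s, '\n' ∉ l := by
  unfold PySem.Chars.splitlines
  exact go_no_nl _ (by decide) s [] [] (by simp) (by simp)

theorem partNl_no_nl (l : List Char) (h : '\n' ∉ l) : partNl l = (l, []) := by
  induction l with
  | nil => rfl
  | cons c cs ih =>
    have hc : ¬ c = '\n' := fun hc => h (by simp [hc])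
    have := ih (fun hm => h (List.mem_cons_of_mem _ hm))
    simp [partNl, hc, this]

theorem partNl_append (l r : List Char) (h : '\n' ∉ l) :
    partNl (l ++ '\n' :: r) = (l, r) := by
  induction l with
  | nil => simp [partNl]
  | cons c cs ih =>
    have hc : ¬ c = '\n' := fun hc => h (by simp [hc])
    have := ih (fun hm => h (List.mem_cons_of_mem _ hm))
    simp [partNl, hc, this]

-- B's string loop computes the same tail as dropping the decorator prefix of the line list.
theorem stripLoopB_join (ls : List (List Char))
    (h : ∀ l ∈ ls, '\n' ∉ l ∧ l ≠ []) :
    stripLoopB (PySem.Chars.join ['\n'] ls)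
      = PySem.Chars.join ['\n'] (ls.drop (fndC ls)) := by
  induction ls with
  | nil =>
    have hj : PySem.Chars.join ['\n'] ([] : List (List Char)) = [] := rfl
    rw [hj, stripLoopB]
    simp [hj]
  | cons l ls ih =>
    obtain ⟨hnl, hne⟩ := h l (List.mem_cons_self)
    have hrest := fun m hm => h m (List.mem_cons_of_mem _ hm)
    cases ls with
    | nil =>
      rw [PySem.Chars.join_singleton]
      rw [stripLoopB]
      simp only [hne, dite_false, partNl_no_nl l hnl]
      by_cases hd : PySem.Chars.startswith (PySem.Chars.strip l) ['@'] = true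
      · rw [if_pos hd, stripLoopB]
        simp [fndC, hd, PySem.Chars.join, List.intercalate]
      · rw [if_neg hd]
        simp [fndC, hd]
    | cons m ms =>
      have hjoin : PySem.Chars.join ['\n'] (l :: m :: ms)
          = l ++ '\n' :: PySem.Chars.join ['\n'] (m :: ms) := by
        rw [PySem.Chars.join_cons_cons]; simp
      rw [hjoin, stripLoopB]
      have hnil : ¬ (l ++ '\n' :: PySem.Chars.join ['\n'] (m :: ms)) = [] := by simp
      simp only [hnil, dite_false, partNl_append l _ hnl]
      by_cases hd : PySem.Chars.startswith (PySem.Chars.strip l) ['@'] = true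
      · rw [if_pos hd, ih hrest]
        simp [fndC, hd]
      · rw [if_neg hd, ← hjoin]
        simp [fndC, hd]

-- ===== VERDICT (by name: the statement is the Claim_ definition above) =====
theorem strip_decorators_spec : Claim_equal_strip_decorators := by
  intro code _
  unfold Spec_strip_decorators strip_decorators strip_decorators_alt
  by_cases h : code == ""
  · simp [h]
  · simp only [h, Bool.false_eq_true, if_false]
    rw [foldl_flag_false]
    set lines := (PySem.Str.splitlines code).filter (fun l => !(PySem.Str.strip l == "")) with hlines
    have hmem : ∀ l ∈ lines, '\n' ∉ l.toList ∧ l.toList ≠ [] := by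
      intro l hl
      rw [hlines, List.mem_filter] at hl
      constructor
      · have : l.toList ∈ PySem.Chars.splitlines code.toList := by
          rw [← PySem.Str.splitlines_map_toList]
          exact List.mem_map_of_mem hl.1
        exact splitlines_no_nl _ _ this
      · intro hnil
        have : PySem.Chars.strip l.toList = [] := by rw [hnil]; rfl
        have hbeq : (PySem.Str.strip l == "") = true := by
          have : (PySem.Str.strip l).toList = ("" : String).toList := by
            simpa [PySem.Str.toList_strip] using this
          simp [beq_iff_eq]
          exact String.toList_injective this
        simp [hbeq] at hl
    have hkey := stripLoopB_join (lines.map String.toList)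
      (by intro l hl; obtain ⟨m, hm, rfl⟩ := List.mem_map.mp hl; exact hmem m hm)
    have hjoinlist : (PySem.Str.join "\n" lines).toList
        = PySem.Chars.join ['\n'] (lines.map String.toList) := by
      rw [PySem.Str.toList_join]; rfl
    rw [hjoinlist.symm] at hkey
    rw [hkey]
    have h2 : PySem.Chars.join ['\n']
        (List.drop (fndC (List.map String.toList lines)) (List.map String.toList lines))
        = (PySem.Str.join "\n" (List.drop (fndC (List.map String.toList lines)) lines)).toList := by
      rw [PySem.Str.toList_join, List.map_drop]; rfl
    rw [h2, String.ofList_toList, List.nil_append]
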